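-- pv_equiv track=rewrite | github.com/hnrie/Laminax-KPL | ai_ml_functions.py | ml_one_hot_encode
-- ===== SOURCE A (Python) =====
-- def ml_one_hot_encode(labels):
--     unique_labels = []
--     for label in labels:
--         if label not in unique_labels:
--             unique_labels.append(label)
--
--     encoded = []
--     for label in labels:
--         encoding = [0] * len(unique_labels)
--         encoding[unique_labels.index(label)] = 1
--         encoded.append(encoding)
--
--     return encoded
-- ===== SOURCE B (Python) =====
-- def ml_one_hot_encode(labels):
--     # Single online pass: emit each row at the current (growing) width = number of
--     # distinct labels seen so far, then pad all rows to the final width at the end.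
--     pos = {}
--     rows = []
--     for label in labels:
--         if label not in pos:
--             pos[label] = len(pos)
--         j = pos[label]
--         rows.append([0] * j + [1] + [0] * (len(pos) - j - 1))
--     k = len(pos)
--     return [row + [0] * (k - len(row)) for row in rows]
-- ===== Notes on version B (the rewrite author's own statement) =====
-- stated objective: alternative
-- what changed: Replaces A's two staged full-width passes (build unique list, then per element scan it twice to build a full-width one-hot row) by a single online pass that emits each row at the growing width of distinct labels seen so far, followed by a final zero-padding pass to the eventual width.
import Mathlib
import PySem

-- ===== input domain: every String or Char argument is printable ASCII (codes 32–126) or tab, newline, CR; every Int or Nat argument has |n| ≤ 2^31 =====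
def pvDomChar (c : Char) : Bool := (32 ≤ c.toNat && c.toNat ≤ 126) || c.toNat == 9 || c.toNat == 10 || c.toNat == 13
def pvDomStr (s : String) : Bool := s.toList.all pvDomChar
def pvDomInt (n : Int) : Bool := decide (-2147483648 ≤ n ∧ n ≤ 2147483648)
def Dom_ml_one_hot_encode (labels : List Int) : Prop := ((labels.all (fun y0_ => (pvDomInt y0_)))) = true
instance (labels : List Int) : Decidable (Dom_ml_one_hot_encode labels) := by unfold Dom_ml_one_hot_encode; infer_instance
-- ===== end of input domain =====

-- B replaces A's two staged full-width passes by a single online pass that emits each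
-- one-hot row at the growing width of distinct labels seen so far, then pads every row
-- with zeros to the final width (alternative algorithm, similar cost).

-- ===== PORT A =====
def ml_one_hot_encode (labels : List Int) : List (List Int) :=
  let unique := labels.foldl (fun u l => if u.contains l then u else u ++ [l]) ([] : List Int)
  labels.foldl (fun enc l =>
    enc ++ [PySem.List.pySetD (List.replicate unique.length (0 : Int))
              (((PySem.List.index? unique l).getD 0 : Nat) : Int) 1]) []

-- ===== PORT B =====
def ml_one_hot_encode_alt (labels : List Int) : List (List Int) :=
  let st := labels.foldl
    (fun (st : PySem.Dict Int Int × List (List Int)) label =>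
      let pos := if st.1.contains label then st.1 else st.1.insert label ((st.1.size : Nat) : Int)
      let j : Int := pos.getD label 0
      -- '[0]*j + [1] + [0]*(len(pos)-j-1)': Python's 'list * n' is [] for n ≤ 0, which Int.toNat matches exactly
      (pos, st.2 ++ [List.replicate j.toNat (0 : Int) ++ [1] ++
                     List.replicate ((pos.size : Int) - j - 1).toNat (0 : Int)]))
    ((PySem.Dict.empty : PySem.Dict Int Int), ([] : List (List Int)))
  let k : Nat := st.1.size
  st.2.map (fun row => row ++ List.replicate ((k : Int) - (row.length : Int)).toNat (0 : Int))

-- ===== PRECONDITION & SPEC =====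
def Spec_ml_one_hot_encode (labels : List Int) (out : List (List Int)) : Prop := out = ml_one_hot_encode_alt labels
instance (labels : List Int) (out : List (List Int)) : Decidable (Spec_ml_one_hot_encode labels out) := by unfold Spec_ml_one_hot_encode; infer_instance

-- ===== CLAIM (what is proved, stated in full; the proofs are below) =====
def Claim_equal_ml_one_hot_encode : Prop := ∀ (labels : List Int), Dom_ml_one_hot_encode labels → Spec_ml_one_hot_encode labels (ml_one_hot_encode labels)

-- ===== LEMMAS AND PROOFS =====

/-- A's unique-list fold, named for the proofs. -/
def uniqueFold (labels u : List Int) : List Int :=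
  labels.foldl (fun u l => if u.contains l then u else u ++ [l]) u

/-- The dict B builds, expressed from a unique-label list: each label paired with its index. -/
def encDict (u : List Int) : PySem.Dict Int Int :=
  ⟨(u.zipIdx).map (fun p => (p.1, (p.2 : Int)))⟩

/-- The truncated row B emits for label `x` when the distinct-seen list is `u`. -/
def rowB (u : List Int) (x : Int) : List Int :=
  List.replicate (u.idxOf x) 0 ++ [1] ++ List.replicate (u.length - u.idxOf x - 1) 0

/-- The sequence of truncated rows B's single pass emits. -/
def rowsFrom (labels u : List Int) : List (List Int) :=
  match labels with
  | [] => []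
  | x :: t =>
      let u' := if u.contains x then u else u ++ [x]
      rowB u' x :: rowsFrom t u'

theorem contains_encDict_aux (u : List Int) (x : Int) (n : Nat) :
    (PySem.Dict.mk ((u.zipIdx n).map (fun p => (p.1, (p.2 : Int))))).contains x = u.contains x := by
  induction u generalizing n with
  | nil => rfl
  | cons a t ih =>
    simp only [List.zipIdx_cons, List.map_cons, PySem.Dict.contains_mk, List.any_cons]
    rw [← PySem.Dict.contains_mk, ih (n + 1), List.contains_cons]
    have : (x == a) = (a == x) := by simp [eq_comm]
    simp [this]

theorem contains_encDict (u : List Int) (x : Int) :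
    (encDict u).contains x = u.contains x := contains_encDict_aux u x 0

theorem size_encDict (u : List Int) : (encDict u).size = u.length := by
  simp [encDict, PySem.Dict.size]

theorem encDict_append (u : List Int) (x : Int) (hx : x ∉ u) :
    encDict (u ++ [x]) = (encDict u).insert x ((encDict u).size : Int) := by
  have hc : (encDict u).contains x = false := by
    rw [contains_encDict]; simpa using hx
  rw [PySem.Dict.insert, hc]
  simp [encDict, PySem.Dict.size, List.zipIdx_append]

theorem getD_encDict (u : List Int) (x : Int) (hx : x ∈ u) :
    (encDict u).getD x 0 = ((u.idxOf x : Nat) : Int) := by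
  suffices h : ∀ (s : Nat), (PySem.Dict.mk ((u.zipIdx s).map (fun p => (p.1, (p.2 : Int))))).get? x = some ((s + u.idxOf x : Nat) : Int) by
    rw [PySem.Dict.getD_eq_get?_getD]
    have := h 0
    simp only [Nat.zero_add] at this
    simp [encDict, this]
  induction u with
  | nil => simp at hx
  | cons a t ih =>
      intro s
      simp only [List.zipIdx_cons, List.map_cons, PySem.Dict.get?_mk_cons]
      by_cases hax : a = x
      · simp [hax, List.idxOf_cons_self]
      · have hx' : x ∈ t := by cases hx with
          | head => exact absurd rfl hax
          | tail _ h => exact h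
        rw [if_neg (by simpa using hax), ih hx' (s + 1)]
        rw [List.idxOf_cons_ne _ (by simpa using hax)]
        congr 1
        omega

/-- B's paired fold tracked against A's unique-list fold: the dict is `encDict` of the
    unique list, and the rows collected are `rowsFrom`. -/
theorem fold_state_eq (labels : List Int) (u : List Int) (rows : List (List Int)) :
    labels.foldl
      (fun (st : PySem.Dict Int Int × List (List Int)) label =>
        let pos := if st.1.contains label then st.1 else st.1.insert label ((st.1.size : Nat) : Int)
        let j : Int := pos.getD label 0
        (pos, st.2 ++ [List.replicate j.toNat (0 : Int) ++ [1] ++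
                       List.replicate ((pos.size : Int) - j - 1).toNat (0 : Int)]))
      (encDict u, rows)
      = (encDict (uniqueFold labels u), rows ++ rowsFrom labels u) := by
  induction labels generalizing u rows with
  | nil => simp [uniqueFold, rowsFrom]
  | cons x t ih =>
      have hstep : (if (encDict u).contains x then encDict u
                    else (encDict u).insert x (((encDict u).size : Nat) : Int))
          = encDict (if u.contains x then u else u ++ [x]) := by
        by_cases h : x ∈ u
        · simp [contains_encDict, h]
        · have hc : u.contains x = false := by simpa using h
          rw [contains_encDict, hc]
          simp only [Bool.false_eq_true, if_false]
          rw [encDict_append u x h]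
      set u' := if u.contains x then u else u ++ [x] with hu'
      have hxu' : x ∈ u' := by
        rw [hu']
        by_cases h : u.contains x = true
        · rw [if_pos h]; simpa using h
        · rw [if_neg h]; simp
      have hjlt : u'.idxOf x < u'.length := List.idxOf_lt_length_of_mem hxu'
      have hrow : List.replicate (((u'.idxOf x : Nat) : Int)).toNat (0 : Int) ++ [1] ++
                  List.replicate ((u'.length : Int) - ((u'.idxOf x : Nat) : Int) - 1).toNat (0 : Int)
          = rowB u' x := by
        unfold rowB
        have h1 : ((((u'.idxOf x : Nat)) : Int)).toNat = u'.idxOf x := by simp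
        have h2 : ((u'.length : Int) - ((u'.idxOf x : Nat) : Int) - 1).toNat
            = u'.length - u'.idxOf x - 1 := by omega
        rw [h1, h2]
      have hf :
          (let pos := if (encDict u, rows).1.contains x then (encDict u, rows).1
                      else (encDict u, rows).1.insert x (((encDict u, rows).1.size : Nat) : Int);
           let j : Int := pos.getD x 0;
           (pos, (encDict u, rows).2 ++ [List.replicate j.toNat (0 : Int) ++ [1] ++
                  List.replicate ((pos.size : Int) - j - 1).toNat (0 : Int)]))
          = (encDict u', rows ++ [rowB u' x]) := by
        simp only []
        rw [hstep, getD_encDict u' x hxu', size_encDict, hrow]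
      have hUF : uniqueFold (x :: t) u = uniqueFold t u' := by
        rw [hu']
        simp [uniqueFold]
      have hrows : rowsFrom (x :: t) u = rowB u' x :: rowsFrom t u' := by
        rw [rowsFrom, ← hu']
      rw [List.foldl_cons, hf, ih u' (rows ++ [rowB u' x]), hUF, hrows]
      rw [List.append_assoc]
      rfl

/-- A's unique fold only appends: the start list is a prefix of the result. -/
theorem prefix_uniqueFold (labels u : List Int) : u <+: uniqueFold labels u := by
  induction labels generalizing u with
  | nil => simp [uniqueFold]
  | cons x t ih =>
      show u <+: uniqueFold t (if u.contains x then u else u ++ [x])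
      by_cases h : u.contains x = true
      · rw [if_pos h]; exact ih u
      · rw [if_neg h]
        exact (List.prefix_append u [x]).trans (ih (u ++ [x]))

theorem idxOf_of_prefix (u w : List Int) (x : Int) (hp : u <+: w) (hx : x ∈ u) :
    w.idxOf x = u.idxOf x := by
  obtain ⟨s, rfl⟩ := hp
  induction u with
  | nil => simp at hx
  | cons a t ih =>
      by_cases hax : a = x
      · simp [hax, List.idxOf_cons_self]
      · have hx' : x ∈ t := by
          rcases List.mem_cons.mp hx with rfl | h2
          · exact absurd rfl hax
          · exact h2
        rw [List.cons_append, List.idxOf_cons_ne _ (by simpa using hax),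
            List.idxOf_cons_ne _ (by simpa using hax), ih hx']

/-- Setting one entry of an all-zero list, written as an append of replicates. -/
theorem set_replicate_eq (k j : Nat) (hj : j < k) :
    (List.replicate k (0 : Int)).set j 1
      = List.replicate j (0 : Int) ++ [1] ++ List.replicate (k - j - 1) (0 : Int) := by
  induction j generalizing k with
  | zero =>
      obtain ⟨m, rfl⟩ : ∃ m, k = m + 1 := ⟨k - 1, by omega⟩
      simp [List.replicate_succ]
  | succ j ih =>
      obtain ⟨m, rfl⟩ : ∃ m, k = m + 1 := ⟨k - 1, by omega⟩
      rw [List.replicate_succ, List.set_cons_succ, ih m (by omega), List.replicate_succ]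
      simp

/-- The padded truncated row equals A's full-width one-hot row. -/
theorem pad_rowB (u w : List Int) (x : Int) (hp : u <+: w) (hx : x ∈ u) :
    rowB u x ++ List.replicate ((w.length : Int) - ((rowB u x).length : Int)).toNat (0 : Int)
      = PySem.List.pySetD (List.replicate w.length (0 : Int)) ((u.idxOf x : Nat) : Int) 1 := by
  have hj : u.idxOf x < u.length := List.idxOf_lt_length_of_mem hx
  have hlen : (rowB u x).length = u.length := by
    simp only [rowB, List.length_append, List.length_replicate, List.length_cons,
      List.length_nil]
    omega
  have hle : u.length ≤ w.length := hp.length_le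
  have hjw : u.idxOf x < w.length := lt_of_lt_of_le hj hle
  have hpad : ((w.length : Int) - ((rowB u x).length : Int)).toNat = w.length - u.length := by
    rw [hlen]; omega
  rw [PySem.List.pySetD_natCast, hpad, set_replicate_eq w.length (u.idxOf x) hjw]
  unfold rowB
  have hrep : List.replicate (u.length - u.idxOf x - 1) (0 : Int) ++
      List.replicate (w.length - u.length) (0 : Int)
      = List.replicate (w.length - u.idxOf x - 1) (0 : Int) := by
    rw [← List.replicate_add]
    congr 1
    omega
  rw [List.append_assoc, hrep]

/-- Every element of `labels` is a member of A's final unique list. -/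
theorem mem_fold_unique (labels : List Int) (u : List Int) (x : Int) (hx : x ∈ u ∨ x ∈ labels) :
    x ∈ uniqueFold labels u := by
  induction labels generalizing u with
  | nil => simpa [uniqueFold] using hx.resolve_right (by simp)
  | cons a t ih =>
      simp only [uniqueFold, List.foldl_cons]
      by_cases h : u.contains a = true
      · rw [if_pos h]
        refine ih _ ?_
        rcases hx with h1 | h1
        · exact Or.inl h1
        · rcases List.mem_cons.mp h1 with rfl | h2
          · exact Or.inl (by simpa using h)
          · exact Or.inr h2
      · rw [if_neg h]
        refine ih _ ?_
        rcases hx with h1 | h1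
        · exact Or.inl (List.mem_append_left _ h1)
        · rcases List.mem_cons.mp h1 with rfl | h2
          · exact Or.inl (by simp)
          · exact Or.inr h2

theorem idxOf?_eq_some_of_mem (u : List Int) (x : Int) (h : x ∈ u) :
    List.idxOf? x u = some (u.idxOf x) := by
  induction u with
  | nil => simp at h
  | cons a t ih =>
    by_cases hax : a = x
    · simp [hax, List.idxOf?_cons, List.idxOf_cons_self]
    · have hx' : x ∈ t := by
        rcases List.mem_cons.mp h with rfl | h2
        · exact absurd rfl hax
        · exact h2
      simp [List.idxOf?_cons, beq_iff_eq, hax, ih hx', Ne.symm] at *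

/-- Padding `rowsFrom labels u` to the final width gives A's full-width rows. -/
theorem map_pad_rowsFrom (labels : List Int) (u : List Int) :
    (rowsFrom labels u).map
        (fun row => row ++ List.replicate (((uniqueFold labels u).length : Int) - (row.length : Int)).toNat (0 : Int))
      = labels.map (fun x =>
          PySem.List.pySetD (List.replicate (uniqueFold labels u).length (0 : Int))
            (((uniqueFold labels u).idxOf x : Nat) : Int) 1) := by
  induction labels generalizing u with
  | nil => simp [rowsFrom]
  | cons x t ih =>
      set u' := if u.contains x then u else u ++ [x] with hu'
      have hxu' : x ∈ u' := by
        rw [hu']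
        by_cases h : u.contains x = true
        · rw [if_pos h]; simpa using h
        · rw [if_neg h]; simp
      have hUF : uniqueFold (x :: t) u = uniqueFold t u' := by
        rw [hu']
        simp [uniqueFold]
      have hpre : u' <+: uniqueFold t u' := prefix_uniqueFold t u'
      have hidx : (uniqueFold t u').idxOf x = u'.idxOf x := idxOf_of_prefix u' _ x hpre hxu'
      have hrows : rowsFrom (x :: t) u = rowB u' x :: rowsFrom t u' := by
        rw [rowsFrom, ← hu']
      rw [hrows, hUF, List.map_cons, List.map_cons, ih u']
      congr 1
      rw [hidx]
      exact pad_rowB u' (uniqueFold t u') x hpre hxu'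

-- ===== VERDICT (by name: the statement is the Claim_ definition above) =====
theorem ml_one_hot_encode_spec : Claim_equal_ml_one_hot_encode := by
  intro labels _
  unfold Spec_ml_one_hot_encode ml_one_hot_encode ml_one_hot_encode_alt
  simp only []
  have hempty : (PySem.Dict.empty : PySem.Dict Int Int) = encDict [] := rfl
  rw [hempty, fold_state_eq labels [] [], List.nil_append]
  have hU : labels.foldl (fun u l => if u.contains l then u else u ++ [l]) ([] : List Int)
      = uniqueFold labels [] := rfl
  rw [hU, size_encDict, PySem.List.foldl_append_singleton_eq_map, List.nil_append,
      map_pad_rowsFrom labels []]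
  apply List.map_congr_left
  intro x hx
  have hmem : x ∈ uniqueFold labels [] := mem_fold_unique labels [] x (Or.inr hx)
  have hidx : PySem.List.index? (uniqueFold labels []) x = some ((uniqueFold labels []).idxOf x) := by
    rw [PySem.List.index?_eq_idxOf?]; exact idxOf?_eq_some_of_mem _ x hmem
  rw [hidx]
  rfl
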